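-- pv_equiv track=rewrite | github.com/ClementCadieux/AdventOfCode | 2025/Day9/main2.py | getMinMaxPoints
-- ===== SOURCE A (Python) =====
-- def getMinMaxPoints(redTiles, maxLine, maxCol):
--     minMaxRedPointLines = [[-1, -1] for _ in range(maxLine + 1)]
--     minMaxRedPointCols = [[-1, -1] for _ in range(maxCol + 1)]
--
--     for tile in redTiles:
--         line = tile[0]
--         col = tile[1]
--
--         if minMaxRedPointCols[col][0] == -1 or minMaxRedPointCols[col][0] > line:
--             minMaxRedPointCols[col][0] = line
--
--         if minMaxRedPointCols[col][1] == -1 or minMaxRedPointCols[col][1] < line: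
--             minMaxRedPointCols[col][1] = line
--
--         if minMaxRedPointLines[line][0] == -1 or minMaxRedPointLines[line][0] > col:
--             minMaxRedPointLines[line][0] = col
--
--         if minMaxRedPointLines[line][1] == -1 or minMaxRedPointLines[line][1] < col:
--             minMaxRedPointLines[line][1] = col
--
--     return minMaxRedPointLines, minMaxRedPointCols
-- ===== SOURCE B (Python) =====
-- def getMinMaxPoints(redTiles, maxLine, maxCol):
--     lineGroups = [[] for _ in range(maxLine + 1)]
--     colGroups = [[] for _ in range(maxCol + 1)]
--     for tile in redTiles:
--         lineGroups[tile[0]].append(tile[1])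
--         colGroups[tile[1]].append(tile[0])
--     minMaxRedPointLines = [[min(g), max(g)] if g else [-1, -1] for g in lineGroups]
--     minMaxRedPointCols = [[min(g), max(g)] if g else [-1, -1] for g in colGroups]
--     return minMaxRedPointLines, minMaxRedPointCols
-- ===== Notes on version B (the rewrite author's own statement) =====
-- stated objective: simpler
-- what changed: B groups the tiles' coordinates into preallocated per-line and per-column lists in one pass and then builds each output row as [min(group), max(group)] (or [-1,-1] for an empty group) by comprehension, instead of A's in-place running min/max updates with -1 sentinels.
-- outside the precondition, e.g. on getMinMaxPoints([[2, 0]], 1, 1): A raises IndexError, B raises IndexError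
import Mathlib
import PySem

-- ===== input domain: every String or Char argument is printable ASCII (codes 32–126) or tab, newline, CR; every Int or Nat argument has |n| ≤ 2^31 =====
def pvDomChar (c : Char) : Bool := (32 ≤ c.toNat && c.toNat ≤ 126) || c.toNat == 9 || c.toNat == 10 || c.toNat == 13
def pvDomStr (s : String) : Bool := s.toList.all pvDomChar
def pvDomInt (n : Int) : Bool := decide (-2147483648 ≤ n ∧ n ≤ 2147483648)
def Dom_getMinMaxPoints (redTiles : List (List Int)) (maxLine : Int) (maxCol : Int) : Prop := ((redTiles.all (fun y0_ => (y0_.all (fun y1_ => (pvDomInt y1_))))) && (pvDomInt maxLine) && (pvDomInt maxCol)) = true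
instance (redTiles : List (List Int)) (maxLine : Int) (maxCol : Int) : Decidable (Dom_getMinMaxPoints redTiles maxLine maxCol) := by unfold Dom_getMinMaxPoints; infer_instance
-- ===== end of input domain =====

-- B groups the tiles' coordinates into preallocated per-line / per-column lists and builds each
-- output row by a min/max comprehension, instead of A's in-place -1-sentinel updates (objective: simpler; same cost).
-- ===== PORT A =====
def getMinMaxPoints (redTiles : List (List Int)) (maxLine : Int) (maxCol : Int) : List (List Int) × List (List Int) :=
  let mmLines := (PySem.List.pyRange 0 (maxLine + 1) 1).map (fun _ => [(-1 : Int), -1])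
  let mmCols := (PySem.List.pyRange 0 (maxCol + 1) 1).map (fun _ => [(-1 : Int), -1])
  redTiles.foldl (fun st tile =>
    let line := PySem.List.pyGetD tile 0 0   -- tile[0]; the IndexError cases are excluded by Pre_
    let col := PySem.List.pyGetD tile 1 0    -- tile[1]
    let cRow0 := PySem.List.pyGetD st.2 col []
    let cRow1 := if PySem.List.pyGetD cRow0 0 0 = -1 ∨ PySem.List.pyGetD cRow0 0 0 > line
                 then PySem.List.pySetD cRow0 0 line else cRow0
    let cRow2 := if PySem.List.pyGetD cRow1 1 0 = -1 ∨ PySem.List.pyGetD cRow1 1 0 < line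
                 then PySem.List.pySetD cRow1 1 line else cRow1
    let lRow0 := PySem.List.pyGetD st.1 line []
    let lRow1 := if PySem.List.pyGetD lRow0 0 0 = -1 ∨ PySem.List.pyGetD lRow0 0 0 > col
                 then PySem.List.pySetD lRow0 0 col else lRow0
    let lRow2 := if PySem.List.pyGetD lRow1 1 0 = -1 ∨ PySem.List.pyGetD lRow1 1 0 < col
                 then PySem.List.pySetD lRow1 1 col else lRow1
    (PySem.List.pySetD st.1 line lRow2, PySem.List.pySetD st.2 col cRow2))
  (mmLines, mmCols)

-- ===== PORT B =====
def getMinMaxPoints_alt (redTiles : List (List Int)) (maxLine : Int) (maxCol : Int) : List (List Int) × List (List Int) :=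
  let lineGroups := (PySem.List.pyRange 0 (maxLine + 1) 1).map (fun _ => ([] : List Int))
  let colGroups := (PySem.List.pyRange 0 (maxCol + 1) 1).map (fun _ => ([] : List Int))
  let st := redTiles.foldl (fun st tile =>
      let line := PySem.List.pyGetD tile 0 0   -- tile[0]; the IndexError cases are excluded by Pre_
      let col := PySem.List.pyGetD tile 1 0    -- tile[1]
      -- lineGroups[tile[0]].append(tile[1]) / colGroups[tile[1]].append(tile[0]) (in-place append = read, extend, write back)
      (PySem.List.pySetD st.1 line (PySem.List.pyGetD st.1 line [] ++ [col]),
       PySem.List.pySetD st.2 col (PySem.List.pyGetD st.2 col [] ++ [line])))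
    (lineGroups, colGroups)
  (st.1.map (fun g => if g = [] then [-1, -1]
             else [(PySem.List.min? g (fun x => x)).getD 0, (PySem.List.max? g (fun x => x)).getD 0]),
   st.2.map (fun g => if g = [] then [-1, -1]
             else [(PySem.List.min? g (fun x => x)).getD 0, (PySem.List.max? g (fun x => x)).getD 0]))
   -- groups are nonempty in the else-branch, so min()/max() never raise; .getD 0 is never used

-- ===== PRECONDITION & SPEC =====
-- Pre_ keeps the natural grid domain: every tile has at least two entries and in-range
-- non-negative coordinates. It excludes the inputs on which both A and B raise IndexError
-- (a short tile, or a coordinate outside [-(max+1), max]) and tiles with a negative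
-- in-range coordinate: there Python's negative-index wraparound makes both return, and
-- A's -1 sentinel can misread a stored coordinate -1 as 'unset', so its value is accidental.
def Pre_getMinMaxPoints (redTiles : List (List Int)) (maxLine : Int) (maxCol : Int) : Prop :=
  ∀ t ∈ redTiles, 2 ≤ t.length ∧ 0 ≤ t.getD 0 0 ∧ t.getD 0 0 ≤ maxLine ∧ 0 ≤ t.getD 1 0 ∧ t.getD 1 0 ≤ maxCol
instance (redTiles : List (List Int)) (maxLine : Int) (maxCol : Int) : Decidable (Pre_getMinMaxPoints redTiles maxLine maxCol) := by unfold Pre_getMinMaxPoints; infer_instance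

def pvWitness_getMinMaxPoints : List (List Int) × Int × Int := ([[0, 1], [2, 0], [0, 0]], 2, 1)

def Spec_getMinMaxPoints (redTiles : List (List Int)) (maxLine : Int) (maxCol : Int) (out : List (List Int) × List (List Int)) : Prop := out = getMinMaxPoints_alt redTiles maxLine maxCol
instance (redTiles : List (List Int)) (maxLine : Int) (maxCol : Int) (out : List (List Int) × List (List Int)) : Decidable (Spec_getMinMaxPoints redTiles maxLine maxCol out) := by unfold Spec_getMinMaxPoints; infer_instance

-- ===== CLAIM (what is proved, stated in full; the proofs are below) =====
def Claim_equal_getMinMaxPoints : Prop := ∀ (redTiles : List (List Int)) (maxLine : Int) (maxCol : Int), Dom_getMinMaxPoints redTiles maxLine maxCol → Pre_getMinMaxPoints redTiles maxLine maxCol → Spec_getMinMaxPoints redTiles maxLine maxCol (getMinMaxPoints redTiles maxLine maxCol)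

-- ===== LEMMAS AND PROOFS =====

-- the min/max summary row of one group of coordinates
def pvRow (g : List Int) : List Int :=
  if g = [] then [-1, -1]
  else [(PySem.List.min? g (fun x => x)).getD 0, (PySem.List.max? g (fun x => x)).getD 0]

-- the group of `val` coordinates of the tiles whose `key` coordinate is i
def pvGrp (ts : List (List Int)) (key val : List Int → Int) (i : Int) : List Int :=
  (ts.filter (fun t => key t == i)).map val

lemma pvGrp_append_singleton (ts : List (List Int)) (key val : List Int → Int) (t : List Int) (i : Int) :
    pvGrp (ts ++ [t]) key val i = pvGrp ts key val i ++ (if key t = i then [val t] else []) := by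
  simp [pvGrp, List.filter_append]
  split_ifs with h <;> simp [h]

lemma minD_append_singleton (g : List Int) (v : Int) (hg : g ≠ []) :
    (PySem.List.min? (g ++ [v]) (fun x => x)).getD 0 = min ((PySem.List.min? g (fun x => x)).getD 0) v := by
  obtain ⟨x, t, rfl⟩ := List.exists_cons_of_ne_nil hg
  rw [List.cons_append, PySem.List.min?_id_cons, PySem.List.min?_id_cons]
  simp [List.foldl_append]

lemma maxD_append_singleton (g : List Int) (v : Int) (hg : g ≠ []) :
    (PySem.List.max? (g ++ [v]) (fun x => x)).getD 0 = max ((PySem.List.max? g (fun x => x)).getD 0) v := by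
  obtain ⟨x, t, rfl⟩ := List.exists_cons_of_ne_nil hg
  rw [List.cons_append, PySem.List.max?_id_cons, PySem.List.max?_id_cons]
  simp [List.foldl_append]

lemma pvRow_step (g : List Int) (v : Int) (hg : ∀ x ∈ g, 0 ≤ x) :
    (if PySem.List.pyGetD (if PySem.List.pyGetD (pvRow g) 0 0 = -1 ∨ PySem.List.pyGetD (pvRow g) 0 0 > v then PySem.List.pySetD (pvRow g) 0 v else pvRow g) 1 0 = -1 ∨
        PySem.List.pyGetD (if PySem.List.pyGetD (pvRow g) 0 0 = -1 ∨ PySem.List.pyGetD (pvRow g) 0 0 > v then PySem.List.pySetD (pvRow g) 0 v else pvRow g) 1 0 < v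
     then PySem.List.pySetD (if PySem.List.pyGetD (pvRow g) 0 0 = -1 ∨ PySem.List.pyGetD (pvRow g) 0 0 > v then PySem.List.pySetD (pvRow g) 0 v else pvRow g) 1 v
     else (if PySem.List.pyGetD (pvRow g) 0 0 = -1 ∨ PySem.List.pyGetD (pvRow g) 0 0 > v then PySem.List.pySetD (pvRow g) 0 v else pvRow g))
    = pvRow (g ++ [v]) := by
  by_cases hnil : g = []
  · subst hnil
    simp [pvRow, PySem.List.pyGetD, PySem.List.pyGet?, PySem.List.pyIdx?, PySem.List.pySetD,
          PySem.List.pySet?, PySem.List.min?, PySem.List.max?]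
  · obtain ⟨m, hm⟩ : ∃ m, PySem.List.min? g (fun x => x) = some m := by
      cases h : PySem.List.min? g (fun x => x) with
      | none => exact absurd ((PySem.List.min?_eq_none_iff g _).mp h) hnil
      | some m => exact ⟨m, rfl⟩
    obtain ⟨M, hM⟩ : ∃ M, PySem.List.max? g (fun x => x) = some M := by
      cases h : PySem.List.max? g (fun x => x) with
      | none => exact absurd ((PySem.List.max?_eq_none_iff g _).mp h) hnil
      | some M => exact ⟨M, rfl⟩
    have hm0 : 0 ≤ m := hg m (PySem.List.min?_mem hm)
    have hM0 : 0 ≤ M := hg M (PySem.List.max?_mem hM)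
    have hrow : pvRow g = [m, M] := by simp [pvRow, hnil, hm, hM]
    have hne : g ++ [v] ≠ [] := by simp
    rw [hrow]
    simp only [pvRow, hne]
    rw [minD_append_singleton g v hnil, maxD_append_singleton g v hnil, hm, hM]
    simp only [Option.getD_some, PySem.List.pyGetD, PySem.List.pyGet?, PySem.List.pyIdx?,
               PySem.List.pySetD, PySem.List.pySet?]
    norm_num
    split_ifs <;> simp_all <;> omega

lemma pySetD_map_pyRange {α : Type} (f : Int → α) (n j : Int) (w : α) (h0 : 0 ≤ j) :
    PySem.List.pySetD ((PySem.List.pyRange 0 n 1).map f) j w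
      = (PySem.List.pyRange 0 n 1).map (fun i => if i = j then w else f i) := by
  rw [PySem.List.pySetD_of_nonneg _ _ h0]
  apply List.ext_getElem (by simp)
  intro k hk1 hk2
  simp only [List.getElem_set, List.getElem_map, PySem.List.getElem_pyRange_one]
  have hk : (k : Int) < n := by
    have := hk2; simp [PySem.List.length_pyRange_one] at this; omega
  by_cases h : (0 : Int) + k = j
  · rw [if_pos (by omega : j.toNat = k), if_pos h]
  · rw [if_neg (by omega), if_neg (by simpa using h)]

lemma pvGrp_nonneg (ts : List (List Int)) (key val : List Int → Int) (i : Int)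
    (H : ∀ t ∈ ts, 0 ≤ val t) : ∀ x ∈ pvGrp ts key val i, 0 ≤ x := by
  intro x hx
  simp only [pvGrp, List.mem_map, List.mem_filter] at hx
  obtain ⟨t, ⟨ht, _⟩, rfl⟩ := hx
  exact H t ht

lemma a_fold_eq (ts : List (List Int)) (maxLine maxCol : Int)
    (H : ∀ t ∈ ts, 2 ≤ t.length ∧ 0 ≤ t.getD 0 0 ∧ t.getD 0 0 ≤ maxLine ∧ 0 ≤ t.getD 1 0 ∧ t.getD 1 0 ≤ maxCol) :
    getMinMaxPoints ts maxLine maxCol =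
      ((PySem.List.pyRange 0 (maxLine + 1) 1).map (fun i => pvRow (pvGrp ts (fun t => PySem.List.pyGetD t 0 0) (fun t => PySem.List.pyGetD t 1 0) i)),
       (PySem.List.pyRange 0 (maxCol + 1) 1).map (fun i => pvRow (pvGrp ts (fun t => PySem.List.pyGetD t 1 0) (fun t => PySem.List.pyGetD t 0 0) i))) := by
  induction ts using List.reverseRecOn with
  | nil =>
    simp only [getMinMaxPoints, List.foldl_nil]
    refine Prod.ext ?_ ?_ <;> · dsimp only
                                apply List.map_congr_left
                                intro i _
                                simp [pvGrp, pvRow]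
  | append_singleton ts t IH =>
    have Ht := H t (by simp)
    obtain ⟨hlen, h0, h1, h2, h3⟩ := Ht
    have Hts : ∀ t' ∈ ts, 2 ≤ t'.length ∧ 0 ≤ t'.getD 0 0 ∧ t'.getD 0 0 ≤ maxLine ∧ 0 ≤ t'.getD 1 0 ∧ t'.getD 1 0 ≤ maxCol :=
      fun t' ht' => H t' (by simp [ht'])
    have IH' := IH Hts
    simp only [getMinMaxPoints, List.foldl_append, List.foldl_cons, List.foldl_nil] at IH' ⊢
    rw [IH']
    rw [PySem.List.pyGetD_ofNat' t 0 0, PySem.List.pyGetD_ofNat' t 1 0]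
    rw [PySem.List.pyGetD_map_pyRange_of_nonneg
          (fun i => pvRow (pvGrp ts (fun t => PySem.List.pyGetD t 0 0) (fun t => PySem.List.pyGetD t 1 0) i))
          (maxLine + 1) (t.getD 0 0) [] h0 (by omega)]
    rw [PySem.List.pyGetD_map_pyRange_of_nonneg
          (fun i => pvRow (pvGrp ts (fun t => PySem.List.pyGetD t 1 0) (fun t => PySem.List.pyGetD t 0 0) i))
          (maxCol + 1) (t.getD 1 0) [] h2 (by omega)]
    rw [pvRow_step _ (t.getD 1 0) (pvGrp_nonneg ts _ _ _ (fun t' ht' => by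
          rw [PySem.List.pyGetD_ofNat' t' 1 0]; exact (Hts t' ht').2.2.2.1))]
    rw [pvRow_step _ (t.getD 0 0) (pvGrp_nonneg ts _ _ _ (fun t' ht' => by
          rw [PySem.List.pyGetD_ofNat' t' 0 0]; exact (Hts t' ht').2.1))]
    rw [pySetD_map_pyRange _ (maxLine + 1) _ _ h0, pySetD_map_pyRange _ (maxCol + 1) _ _ h2]
    refine Prod.ext ?_ ?_
    · dsimp only
      apply List.map_congr_left
      intro i _
      rw [pvGrp_append_singleton]
      rw [PySem.List.pyGetD_ofNat' t 0 0, PySem.List.pyGetD_ofNat' t 1 0]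
      by_cases h : i = t.getD 0 0
      · subst h; rw [if_pos rfl, if_pos rfl]
      · rw [if_neg h, if_neg (by omega), List.append_nil]
    · dsimp only
      apply List.map_congr_left
      intro i _
      rw [pvGrp_append_singleton]
      rw [PySem.List.pyGetD_ofNat' t 1 0, PySem.List.pyGetD_ofNat' t 0 0]
      by_cases h : i = t.getD 1 0
      · subst h; rw [if_pos rfl, if_pos rfl]
      · rw [if_neg h, if_neg (by omega), List.append_nil]

lemma b_fold_eq (ts : List (List Int)) (maxLine maxCol : Int)
    (H : ∀ t ∈ ts, 2 ≤ t.length ∧ 0 ≤ t.getD 0 0 ∧ t.getD 0 0 ≤ maxLine ∧ 0 ≤ t.getD 1 0 ∧ t.getD 1 0 ≤ maxCol) :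
    ts.foldl (fun (st : List (List Int) × List (List Int)) tile =>
        (PySem.List.pySetD st.1 (PySem.List.pyGetD tile 0 0)
           (PySem.List.pyGetD st.1 (PySem.List.pyGetD tile 0 0) [] ++ [PySem.List.pyGetD tile 1 0]),
         PySem.List.pySetD st.2 (PySem.List.pyGetD tile 1 0)
           (PySem.List.pyGetD st.2 (PySem.List.pyGetD tile 1 0) [] ++ [PySem.List.pyGetD tile 0 0])))
      ((PySem.List.pyRange 0 (maxLine + 1) 1).map (fun _ => ([] : List Int)),
       (PySem.List.pyRange 0 (maxCol + 1) 1).map (fun _ => ([] : List Int))) =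
      ((PySem.List.pyRange 0 (maxLine + 1) 1).map (fun i => pvGrp ts (fun t => PySem.List.pyGetD t 0 0) (fun t => PySem.List.pyGetD t 1 0) i),
       (PySem.List.pyRange 0 (maxCol + 1) 1).map (fun i => pvGrp ts (fun t => PySem.List.pyGetD t 1 0) (fun t => PySem.List.pyGetD t 0 0) i)) := by
  induction ts using List.reverseRecOn with
  | nil =>
    simp only [List.foldl_nil]
    refine Prod.ext ?_ ?_ <;> · dsimp only
                                apply List.map_congr_left
                                intro i _
                                simp [pvGrp]
  | append_singleton ts t IH =>
    have Ht := H t (by simp)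
    obtain ⟨hlen, h0, h1, h2, h3⟩ := Ht
    have Hts : ∀ t' ∈ ts, 2 ≤ t'.length ∧ 0 ≤ t'.getD 0 0 ∧ t'.getD 0 0 ≤ maxLine ∧ 0 ≤ t'.getD 1 0 ∧ t'.getD 1 0 ≤ maxCol :=
      fun t' ht' => H t' (by simp [ht'])
    rw [List.foldl_append, List.foldl_cons, List.foldl_nil, IH Hts]
    rw [PySem.List.pyGetD_ofNat' t 0 0, PySem.List.pyGetD_ofNat' t 1 0]
    rw [PySem.List.pyGetD_map_pyRange_of_nonneg
          (fun i => pvGrp ts (fun t => PySem.List.pyGetD t 0 0) (fun t => PySem.List.pyGetD t 1 0) i)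
          (maxLine + 1) (t.getD 0 0) [] h0 (by omega)]
    rw [PySem.List.pyGetD_map_pyRange_of_nonneg
          (fun i => pvGrp ts (fun t => PySem.List.pyGetD t 1 0) (fun t => PySem.List.pyGetD t 0 0) i)
          (maxCol + 1) (t.getD 1 0) [] h2 (by omega)]
    rw [pySetD_map_pyRange _ (maxLine + 1) _ _ h0, pySetD_map_pyRange _ (maxCol + 1) _ _ h2]
    refine Prod.ext ?_ ?_
    · dsimp only
      apply List.map_congr_left
      intro i _
      rw [pvGrp_append_singleton]
      rw [PySem.List.pyGetD_ofNat' t 0 0, PySem.List.pyGetD_ofNat' t 1 0]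
      by_cases h : i = t.getD 0 0
      · subst h; rw [if_pos rfl, if_pos rfl]
      · rw [if_neg h, if_neg (by omega), List.append_nil]
    · dsimp only
      apply List.map_congr_left
      intro i _
      rw [pvGrp_append_singleton]
      rw [PySem.List.pyGetD_ofNat' t 1 0, PySem.List.pyGetD_ofNat' t 0 0]
      by_cases h : i = t.getD 1 0
      · subst h; rw [if_pos rfl, if_pos rfl]
      · rw [if_neg h, if_neg (by omega), List.append_nil]

lemma b_eq (ts : List (List Int)) (maxLine maxCol : Int)
    (H : ∀ t ∈ ts, 2 ≤ t.length ∧ 0 ≤ t.getD 0 0 ∧ t.getD 0 0 ≤ maxLine ∧ 0 ≤ t.getD 1 0 ∧ t.getD 1 0 ≤ maxCol) :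
    getMinMaxPoints_alt ts maxLine maxCol =
      ((PySem.List.pyRange 0 (maxLine + 1) 1).map (fun i => pvRow (pvGrp ts (fun t => PySem.List.pyGetD t 0 0) (fun t => PySem.List.pyGetD t 1 0) i)),
       (PySem.List.pyRange 0 (maxCol + 1) 1).map (fun i => pvRow (pvGrp ts (fun t => PySem.List.pyGetD t 1 0) (fun t => PySem.List.pyGetD t 0 0) i))) := by
  simp only [getMinMaxPoints_alt]
  rw [b_fold_eq ts maxLine maxCol H]
  dsimp only
  rw [List.map_map, List.map_map]
  rfl

-- ===== VERDICT (by name: the statement is the Claim_ definition above) =====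
theorem getMinMaxPoints_spec : Claim_equal_getMinMaxPoints := by
  intro redTiles maxLine maxCol _hD hP
  unfold Spec_getMinMaxPoints
  rw [a_fold_eq redTiles maxLine maxCol hP, b_eq redTiles maxLine maxCol hP]
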